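-- pv_equiv track=rewrite | github.com/fp-computer-programming/hw-8-2-p22rstewart | hw8-2-5.py | sum_before_odd
-- ===== SOURCE A (Python) =====
-- def sum_before_odd(nums):
--     sum = 0
--     for x in nums:
--         if x % 2 != 0:
--             break
--         else:
--             sum += x
--     return sum
-- ===== SOURCE B (Python) =====
-- def sum_before_odd(nums):
--     # Stage 1: locate the boundary = index of the first odd element (or len).
--     boundary = next((i for i, x in enumerate(nums) if x % 2 != 0), len(nums))
--     # Stage 2: sum the slice before the boundary.
--     return sum(nums[:boundary])
-- ===== Notes on version B (the rewrite author's own statement) =====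
-- stated objective: alternative
-- what changed: Replaces the single accumulate-and-break loop by two staged passes: first a search computing the index of the first odd element, then a sum over the slice before that index.
import Mathlib
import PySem

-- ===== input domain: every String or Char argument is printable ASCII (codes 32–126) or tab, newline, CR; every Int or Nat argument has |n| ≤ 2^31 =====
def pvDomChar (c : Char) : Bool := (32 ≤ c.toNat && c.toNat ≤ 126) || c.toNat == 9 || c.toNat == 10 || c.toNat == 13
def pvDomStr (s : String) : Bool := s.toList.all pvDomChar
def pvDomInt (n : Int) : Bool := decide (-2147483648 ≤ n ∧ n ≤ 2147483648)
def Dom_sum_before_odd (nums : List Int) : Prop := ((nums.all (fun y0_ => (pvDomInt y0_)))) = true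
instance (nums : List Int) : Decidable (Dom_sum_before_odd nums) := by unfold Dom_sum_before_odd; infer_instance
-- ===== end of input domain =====

-- B replaces A's accumulate-and-break loop by two staged passes: find the index of the first odd element, then sum the slice before it (alternative decomposition, same cost).


-- ===== PORT A =====
-- loop with accumulator `sum`; `break` on the first odd element
def sumBeforeOddLoop (acc : Int) : List Int → Int
  | [] => acc
  | x :: xs => if PySem.Int.mod x 2 ≠ 0 then acc else sumBeforeOddLoop (acc + x) xs

def sum_before_odd (nums : List Int) : Int := sumBeforeOddLoop 0 nums

-- ===== PORT B =====
-- Stage 1 of Source B: the generator search `next((i for i,x in enumerate(nums) if x % 2 != 0), len(nums))`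
def firstOddIdx : List Int → Nat
  | [] => 0
  | x :: xs => if PySem.Int.mod x 2 ≠ 0 then 0 else firstOddIdx xs + 1

-- Stage 2 of Source B: `sum(nums[:boundary])`
def sum_before_odd_alt (nums : List Int) : Int :=
  (PySem.List.slice nums none (some (firstOddIdx nums : Int))).sum

-- ===== PRECONDITION & SPEC =====
def Spec_sum_before_odd (nums : List Int) (out : Int) : Prop := out = sum_before_odd_alt nums
instance (nums : List Int) (out : Int) : Decidable (Spec_sum_before_odd nums out) := by unfold Spec_sum_before_odd; infer_instance

-- ===== CLAIM (what is proved, stated in full; the proofs are below) =====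
def Claim_equal_sum_before_odd : Prop := ∀ (nums : List Int), Dom_sum_before_odd nums → Spec_sum_before_odd nums (sum_before_odd nums)

-- ===== LEMMAS AND PROOFS =====
theorem slice_zero_eq_take (xs : List Int) (n : Nat) :
    PySem.List.slice xs none (some (n : Int)) = xs.take n :=
  PySem.List.slice_to_natCast xs n

theorem loop_eq_take (nums : List Int) : ∀ acc : Int,
    sumBeforeOddLoop acc nums = acc + (nums.take (firstOddIdx nums)).sum := by
  induction nums with
  | nil => intro acc; simp [sumBeforeOddLoop, firstOddIdx]
  | cons x xs ih =>
    intro acc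
    by_cases h : Int.fmod x 2 = 0
    · simp [sumBeforeOddLoop, firstOddIdx, PySem.Int.mod, h, ih]
      ring
    · simp [sumBeforeOddLoop, firstOddIdx, PySem.Int.mod, h]

-- ===== VERDICT (by name: the statement is the Claim_ definition above) =====
theorem sum_before_odd_spec : Claim_equal_sum_before_odd := by
  intro nums _
  unfold Spec_sum_before_odd sum_before_odd sum_before_odd_alt
  rw [slice_zero_eq_take]
  simpa using loop_eq_take nums 0
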